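-- pv_equiv track=rewrite | github.com/delboh/baca | baca/sequence.py | degree_of_rotational_symmetry
-- ===== SOURCE A (Python) =====
-- def degree_of_rotational_symmetry(sequence):
--     """
--     Gets degree of rotational symmetry.
--
--     ..  container:: example
--
--         >>> baca.sequence.degree_of_rotational_symmetry([1, 1, 1, 1, 1, 1])
--         6
--
--         >>> baca.sequence.degree_of_rotational_symmetry([1, 2, 1, 2, 1, 2])
--         3
--
--         >>> baca.sequence.degree_of_rotational_symmetry([1, 2, 3, 1, 2, 3])
--         2
--
--         >>> baca.sequence.degree_of_rotational_symmetry([1, 2, 3, 4, 5, 6])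
--         1
--
--         >>> baca.sequence.degree_of_rotational_symmetry([])
--         1
--
--     Returns positive integer.
--     """
--     degree_of_rotational_symmetry = 0
--     for index in range(len(sequence)):
--         rotation = sequence[index:] + sequence[:index]
--         if rotation == sequence:
--             degree_of_rotational_symmetry += 1
--     degree_of_rotational_symmetry = degree_of_rotational_symmetry or 1
--     return degree_of_rotational_symmetry
-- ===== SOURCE B (Python) =====
-- def degree_of_rotational_symmetry(sequence):
--     n = len(sequence)
--     for period in range(1, n + 1):
--         if n % period == 0 and sequence[period:] + sequence[:period] == sequence:
--             return n // period
--     return 1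
-- ===== Notes on version B (the rewrite author's own statement) =====
-- stated objective: faster
-- what changed: Instead of building and comparing all n rotations and counting matches, B scans candidate periods 1..n, skips non-divisors of n with a cheap modulus test, and returns n // period at the first divisor whose rotation fixes the sequence (the smallest rotation period always divides n, so the count of fixing rotations is n // period).
import Mathlib
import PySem

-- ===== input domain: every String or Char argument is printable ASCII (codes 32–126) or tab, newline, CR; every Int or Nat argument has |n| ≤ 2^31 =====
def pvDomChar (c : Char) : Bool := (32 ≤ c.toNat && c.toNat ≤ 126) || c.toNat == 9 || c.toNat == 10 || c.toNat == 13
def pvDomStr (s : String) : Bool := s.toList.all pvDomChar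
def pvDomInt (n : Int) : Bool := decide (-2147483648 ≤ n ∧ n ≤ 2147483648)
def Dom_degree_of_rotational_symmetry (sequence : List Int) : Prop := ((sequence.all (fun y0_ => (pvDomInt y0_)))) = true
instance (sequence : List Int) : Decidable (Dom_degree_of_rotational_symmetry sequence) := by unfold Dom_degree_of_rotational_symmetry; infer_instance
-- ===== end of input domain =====

-- B changes the algorithm: instead of counting all n rotation matches, it scans candidate
-- periods and returns n // period at the first divisor of n whose rotation fixes the sequence.

-- ===== PORT A =====
-- A: count indices i in range(len(sequence)) with sequence[i:] + sequence[:i] == sequence; 'or 1' fallback.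
def degree_of_rotational_symmetry (sequence : List Int) : Int :=
  let deg : Int :=
    (PySem.List.pyRange 0 (PySem.List.len sequence) 1).foldl
      (fun acc index =>
        if PySem.List.slice sequence (some index) none ++ PySem.List.slice sequence none (some index) = sequence
        then acc + 1 else acc) 0
  if deg = 0 then 1 else deg    -- 'degree or 1'

-- ===== PORT B =====
-- B: for period in range(1, n+1): if n % period == 0 and rotation-by-period == sequence: return n // period
-- (loop variable and arithmetic are nonnegative throughout, so Nat % and / are Python-exact here)
def pvAltGo (sequence : List Int) (n : Nat) (period : Nat) (fuel : Nat) : Int :=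
  match fuel with
  | 0 => 1    -- loop exhausted without return (only when n = 0): return 1
  | fuel + 1 =>
    if n % period = 0 ∧
       PySem.List.slice sequence (some (period : Int)) none ++ PySem.List.slice sequence none (some (period : Int)) = sequence
    then ((n / period : Nat) : Int)
    else pvAltGo sequence n (period + 1) fuel

def degree_of_rotational_symmetry_alt (sequence : List Int) : Int :=
  pvAltGo sequence sequence.length 1 sequence.length

-- ===== PRECONDITION & SPEC =====
def Spec_degree_of_rotational_symmetry (sequence : List Int) (out : Int) : Prop := out = degree_of_rotational_symmetry_alt sequence
instance (sequence : List Int) (out : Int) : Decidable (Spec_degree_of_rotational_symmetry sequence out) := by unfold Spec_degree_of_rotational_symmetry; infer_instance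

-- ===== CLAIM (what is proved, stated in full; the proofs are below) =====
def Claim_equal_degree_of_rotational_symmetry : Prop := ∀ (sequence : List Int), Dom_degree_of_rotational_symmetry sequence → Spec_degree_of_rotational_symmetry sequence (degree_of_rotational_symmetry sequence)

-- ===== LEMMAS AND PROOFS =====

-- "rotation by k fixes s", for 0 ≤ k ≤ s.length, is List.rotate
theorem pv_rot_iff (s : List Int) (k : Nat) (hk : k ≤ s.length) :
    (s.drop k ++ s.take k = s) ↔ s.rotate k = s := by
  rw [List.rotate_eq_drop_append_take hk]

-- multiples of the least fixing rotation also fix s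
theorem pv_rot_mul (s : List Int) (d q : Nat) (hd : s.rotate d = s) : s.rotate (q * d) = s := by
  induction q with
  | zero => simp
  | succ q ih =>
    have : s.rotate (q * d + d) = (s.rotate (q * d)).rotate d := (List.rotate_rotate s (q * d) d).symm
    simpa [Nat.succ_mul, this, ih] using hd

-- characterisation: rotate i fixes s exactly when the least positive fixing d divides i
theorem pv_rot_dvd_iff (s : List Int) (d : Nat) (hdpos : 0 < d) (hd : s.rotate d = s)
    (hmin : ∀ m, 0 < m → m < d → s.rotate m ≠ s) (i : Nat) :
    s.rotate i = s ↔ d ∣ i := by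
  constructor
  · intro hi
    have h0 : s.rotate ((i / d) * d) = s := pv_rot_mul s d (i / d) hd
    have h1 : s.rotate ((i / d) * d + i % d) = (s.rotate ((i / d) * d)).rotate (i % d) :=
      (List.rotate_rotate s ((i / d) * d) (i % d)).symm
    have h2 : (i / d) * d + i % d = i := by rw [Nat.mul_comm]; exact Nat.div_add_mod i d
    rw [h2, h0, hi] at h1
    by_contra hnd
    have hpos : 0 < i % d := Nat.pos_of_ne_zero (fun h => hnd (Nat.dvd_of_mod_eq_zero h))
    exact hmin _ hpos (Nat.mod_lt _ hdpos) h1.symm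
  · rintro ⟨q, rfl⟩
    rw [Nat.mul_comm]
    exact pv_rot_mul s d q hd

-- count of multiples of d below q*d is q
theorem pv_count_zero_pred (d : Nat) (hd : 0 < d) :
    (List.range d).countP (fun j => decide (j = 0)) = 1 := by
  cases d with
  | zero => omega
  | succ e =>
    rw [List.range_succ_eq_map]
    simp [List.countP_map, Function.comp]

theorem pv_count_mul (d : Nat) (hd : 0 < d) (q : Nat) :
    (List.range (q * d)).countP (fun i => decide (d ∣ i)) = q := by
  induction q with
  | zero => simp
  | succ q ih =>
    rw [Nat.succ_mul, List.range_add, List.countP_append, ih, List.countP_map]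
    have h1 : (List.range d).countP ((fun i => decide (d ∣ i)) ∘ (fun x => q * d + x))
        = (List.range d).countP (fun j => decide (j = 0)) := by
      apply List.countP_congr
      intro j hj
      have hjd : j < d := List.mem_range.mp hj
      simp only [Function.comp]
      by_cases h : j = 0
      · subst h; simp
      · have hnd : ¬ d ∣ q * d + j := by
          intro hdvd
          have : d ∣ j := (Nat.dvd_add_right (dvd_mul_left d q)).mp hdvd
          exact h (Nat.eq_zero_of_dvd_of_lt this hjd)
        simp [h, hnd]
    rw [h1, pv_count_zero_pred d hd]

-- B's loop returns n / d when d is the first period satisfying the test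
theorem pv_altGo_find (s : List Int) (n d : Nat)
    (hC : n % d = 0 ∧ s.drop d ++ s.take d = s)
    (hmin : ∀ j, 1 ≤ j → j < d → ¬ (n % j = 0 ∧ s.drop j ++ s.take j = s)) :
    ∀ fuel p, 1 ≤ p → p ≤ d → d < p + fuel → pvAltGo s n p fuel = ((n / d : Nat) : Int) := by
  intro fuel
  induction fuel with
  | zero => intro p _ h1 h2; omega
  | succ fuel ih =>
    intro p hp hpd hlt
    rw [pvAltGo]
    simp only [PySem.List.slice_from_natCast, PySem.List.slice_to_natCast]
    by_cases hpd' : p = d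
    · subst hpd'; simp [hC.1, hC.2]
    · have hplt : p < d := lt_of_le_of_ne hpd hpd'
      have hnc := hmin p hp hplt
      rw [if_neg hnc]
      exact ih (p + 1) (by omega) (by omega) (by omega)

-- A's result written as a count over List.range
theorem pv_A_count (s : List Int) :
    degree_of_rotational_symmetry s =
      (if ((List.range s.length).countP (fun k => decide (s.drop k ++ s.take k = s)) : Int) = 0 then (1 : Int)
       else ((List.range s.length).countP (fun k => decide (s.drop k ++ s.take k = s)) : Int)) := by
  unfold degree_of_rotational_symmetry
  simp only [PySem.List.len_eq, PySem.List.pyRange_one, Int.sub_zero, Int.toNat_natCast,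
    List.foldl_map, zero_add, PySem.List.slice_from_natCast, PySem.List.slice_to_natCast,
    PySem.List.foldl_ite_add_one]

theorem degree_of_rotational_symmetry_spec : Claim_equal_degree_of_rotational_symmetry := by
  intro s _
  unfold Spec_degree_of_rotational_symmetry
  by_cases hn : s.length = 0
  · have hnil : s = [] := List.eq_nil_of_length_eq_zero hn
    subst hnil; rfl
  · have hnpos : 0 < s.length := Nat.pos_of_ne_zero hn
    have hex : ∃ k, 0 < k ∧ s.rotate k = s := ⟨s.length, hnpos, List.rotate_length s⟩
    set d := Nat.find hex with hd_def
    obtain ⟨hdpos, hdrot⟩ := Nat.find_spec hex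
    have hmin : ∀ m, 0 < m → m < d → s.rotate m ≠ s :=
      fun m hm hmd hrot => Nat.find_min hex hmd ⟨hm, hrot⟩
    have hdvd_iff := pv_rot_dvd_iff s d hdpos hdrot hmin
    have hdn : d ∣ s.length := (hdvd_iff s.length).mp (List.rotate_length s)
    have hdle : d ≤ s.length := Nat.le_of_dvd hnpos hdn
    -- B's value
    have hB : degree_of_rotational_symmetry_alt s = ((s.length / d : Nat) : Int) := by
      unfold degree_of_rotational_symmetry_alt
      apply pv_altGo_find s s.length d
      · exact ⟨Nat.dvd_iff_mod_eq_zero.mp hdn, (pv_rot_iff s d hdle).mpr hdrot⟩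
      · intro j hj hjd hCj
        have hjle : j ≤ s.length := le_trans (le_of_lt hjd) hdle
        exact hmin j (by omega) hjd ((pv_rot_iff s j hjle).mp hCj.2)
      · omega
      · omega
      · omega
    -- A's value
    have hcount : (List.range s.length).countP (fun k => decide (s.drop k ++ s.take k = s))
        = s.length / d := by
      have hcongr : (List.range s.length).countP (fun k => decide (s.drop k ++ s.take k = s))
          = (List.range s.length).countP (fun k => decide (d ∣ k)) := by
        apply List.countP_congr
        intro k hk
        have hklt : k < s.length := List.mem_range.mp hk
        have : (s.drop k ++ s.take k = s) ↔ d ∣ k := by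
          rw [pv_rot_iff s k (le_of_lt hklt)]
          exact hdvd_iff k
        simp [this]
      rw [hcongr]
      have hmul : s.length / d * d = s.length := Nat.div_mul_cancel hdn
      calc (List.range s.length).countP (fun k => decide (d ∣ k))
          = (List.range (s.length / d * d)).countP (fun k => decide (d ∣ k)) := by rw [hmul]
        _ = s.length / d := pv_count_mul d hdpos _
    have hdivpos : 0 < s.length / d := Nat.div_pos hdle hdpos
    rw [pv_A_count, hcount, hB]
    rw [if_neg (by exact_mod_cast hdivpos.ne')]
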